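-- pv_equiv track=rewrite | github.com/TomWatson6/AdventOfCode | Python/2019/4/main.py | two_adjacent_p2
-- ===== SOURCE A (Python) =====
-- def two_adjacent_p2(number):
--     n = str(number)
--
--     curr = 1
--     last = n[0]
--     counts = []
--
--     for x in n[1:]:
--         if x != last:
--             counts.append(curr)
--             curr = 0
--         curr += 1
--         last = x
--
--     counts.append(curr)
--
--     return any([x == 2 for x in counts])
-- ===== SOURCE B (Python) =====
-- def two_adjacent_p2(number):
--     def scan(prev, s):
--         if len(s) < 2:
--             return False
--         a = s[0]
--         if a == s[1] and prev != a and (len(s) < 3 or s[2] != a):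
--             return True
--         return scan(a, s[1:])
--     return scan(None, str(number))
-- ===== Notes on version B (the rewrite author's own statement) =====
-- stated objective: alternative
-- what changed: Replaced the run-length-accumulator (counts list built then scanned for a 2) with a sliding-window recursion that tests each adjacent equal pair for being an isolated run of exactly two, returning True at the first hit.
import Mathlib
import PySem

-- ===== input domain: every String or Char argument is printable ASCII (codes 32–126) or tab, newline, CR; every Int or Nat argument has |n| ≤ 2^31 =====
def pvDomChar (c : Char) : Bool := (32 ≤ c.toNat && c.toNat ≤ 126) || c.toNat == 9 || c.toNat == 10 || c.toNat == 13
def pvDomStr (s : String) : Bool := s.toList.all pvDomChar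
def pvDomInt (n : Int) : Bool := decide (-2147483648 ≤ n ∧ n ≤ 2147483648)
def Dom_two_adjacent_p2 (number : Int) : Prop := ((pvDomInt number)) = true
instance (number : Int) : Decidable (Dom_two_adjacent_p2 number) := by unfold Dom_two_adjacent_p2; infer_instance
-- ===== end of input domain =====

-- B replaces A's run-length-accumulator with a sliding-window recursion detecting an isolated
-- pair of equal adjacent characters; same return value on every int (objective: alternative).

-- ===== PORT A =====
-- fold step of A's for-loop over state (curr, last, counts)
def pvStepA (s : Int × Char × List Int) (x : Char) : Int × Char × List Int :=
  let (curr, last, counts) := s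
  if x != last then (0 + 1, x, counts ++ [curr]) else (curr + 1, last, counts)

def two_adjacent_p2 (number : Int) : Bool :=
  match (PySem.Int.toStr number).toList with
  | [] => false  -- unreachable: str(number) is never empty, so n[0] cannot raise
  | c0 :: rest =>
    let st := rest.foldl pvStepA (1, c0, [])
    let counts := st.2.2 ++ [st.1]
    counts.any (fun x => x == 2)

-- ===== PORT B =====
-- scan(prev, s) of Source B: window test on s[0], s[1], prev, s[2]
def pvScanB : Option Char → List Char → Bool
  | prev, a :: b :: rest =>
    if a == b && prev != some a && (match rest with | [] => true | c :: _ => c != a) then true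
    else pvScanB (some a) (b :: rest)
  | _, _ => false

def two_adjacent_p2_alt (number : Int) : Bool :=
  pvScanB none (PySem.Int.toStr number).toList

-- ===== PRECONDITION & SPEC =====
def Spec_two_adjacent_p2 (number : Int) (out : Bool) : Prop := out = two_adjacent_p2_alt number
instance (number : Int) (out : Bool) : Decidable (Spec_two_adjacent_p2 number out) := by unfold Spec_two_adjacent_p2; infer_instance

-- ===== CLAIM (what is proved, stated in full; the proofs are below) =====
def Claim_equal_two_adjacent_p2 : Prop := ∀ (number : Int), Dom_two_adjacent_p2 number → Spec_two_adjacent_p2 number (two_adjacent_p2 number)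

-- ===== LEMMAS AND PROOFS =====

-- "the run decomposition of `last^curr ++ xs` contains a run of length exactly 2"
def pvG (curr : Int) (last : Char) : List Char → Bool
  | [] => curr == 2
  | x :: xs => if x ≠ last then (curr == 2) || pvG 1 x xs else pvG (curr + 1) last xs

theorem pvA1 (xs : List Char) : ∀ (curr : Int) (last : Char) (counts : List Int),
    (((xs.foldl pvStepA (curr, last, counts)).2.2 ++ [(xs.foldl pvStepA (curr, last, counts)).1]).any (fun x => x == 2))
      = (counts.any (fun x => x == 2) || pvG curr last xs) := by
  induction xs with
  | nil => intro curr last counts; simp [pvG, List.any_append]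
  | cons x xs ih =>
    intro curr last counts
    by_cases h : x = last
    · simp [pvStepA, h, pvG, ih]
    · simp [List.foldl, pvStepA, h, pvG, ih, List.any_append]
      simp [Bool.or_assoc, Bool.or_comm]

theorem pvG_high (xs : List Char) : ∀ (j k : Int) (a : Char), 2 < j → 2 < k →
    pvG j a xs = pvG k a xs := by
  induction xs with
  | nil => intro j k a hj hk; simp [pvG]; omega
  | cons x xs ih =>
    intro j k a hj hk
    by_cases h : x = a
    · simp [pvG, h]; exact ih _ _ _ (by omega) (by omega)
    · simp [pvG, h]
      have : (j == 2) = false := by simp; omega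
      have hk2 : (k == 2) = false := by simp; omega
      simp [this, hk2]

theorem pvLQaux (n : Nat) : ∀ (l : List Char), l.length ≤ n →
    (∀ (a : Char) (xs : List Char) (p : Option Char),
        l = a :: xs → p ≠ some a → pvScanB p l = pvG 1 a xs)
    ∧ (∀ (a : Char) (xs : List Char), l = a :: xs → pvScanB (some a) l = pvG 3 a xs) := by
  induction n with
  | zero =>
    intro l hl
    constructor
    · intro a xs p heq hp; subst heq; simp at hl
    · intro a xs heq; subst heq; simp at hl
  | succ n ih =>
    intro l hl
    constructor
    · intro a xs p heq hp
      subst heq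
      cases xs with
      | nil => simp [pvScanB, pvG]
      | cons c r =>
        have hlen : (c :: r).length ≤ n := by simp at hl ⊢; omega
        by_cases hc : c = a
        · subst hc
          cases r with
          | nil => simp [pvScanB, pvG, hp]
          | cons d t =>
            by_cases hd : d = c
            · subst hd
              have hlen2 : (d :: t).length ≤ n := by simp at hl ⊢; omega
              simp only [pvScanB, bne_self_eq_false, Bool.and_false, Bool.false_and,
                Bool.false_eq_true, if_false, beq_self_eq_true, Bool.true_and]
              rw [(ih (d :: t) hlen2).2 d t rfl]
              simp [pvG]
            · simp [pvScanB, pvG, hp, hd]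
        · have h1 := (ih (c :: r) hlen).1 c r (some a) rfl
            (fun e => hc (Option.some.inj e).symm)
          have hac : (a == c) = false := beq_eq_false_iff_ne.mpr (fun e => hc e.symm)
          simp only [pvScanB, hac, Bool.false_and, Bool.false_eq_true, if_false]
          rw [h1]
          simp [pvG, fun e : c = a => hc e]
    · intro a xs heq
      subst heq
      cases xs with
      | nil => simp [pvScanB, pvG]
      | cons c r =>
        have hlen : (c :: r).length ≤ n := by simp at hl ⊢; omega
        by_cases hc : c = a
        · subst hc
          have hlen2 : (c :: r).length ≤ n := hlen
          simp only [pvScanB, bne_self_eq_false, Bool.and_false, Bool.false_and,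
            Bool.false_eq_true, if_false]
          rw [(ih (c :: r) hlen2).2 c r rfl]
          simp only [pvG, ne_eq, not_true_eq_false, if_false]
          norm_num
          exact pvG_high r 3 4 c (by omega) (by omega)
        · have h1 := (ih (c :: r) hlen).1 c r (some a) rfl
            (fun e => hc (Option.some.inj e).symm)
          simp only [pvScanB, bne_self_eq_false, Bool.and_false, Bool.false_and,
            Bool.false_eq_true, if_false]
          rw [h1]
          simp [pvG, fun e : c = a => hc e]

theorem pvLQ (l : List Char) :
    (∀ (a : Char) (xs : List Char) (p : Option Char),
        l = a :: xs → p ≠ some a → pvScanB p l = pvG 1 a xs)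
    ∧ (∀ (a : Char) (xs : List Char), l = a :: xs → pvScanB (some a) l = pvG 3 a xs) :=
  pvLQaux l.length l le_rfl

-- ===== VERDICT (by name: the statement is the Claim_ definition above) =====
theorem two_adjacent_p2_spec : Claim_equal_two_adjacent_p2 := by
  intro number _
  unfold Spec_two_adjacent_p2 two_adjacent_p2 two_adjacent_p2_alt
  cases h : (PySem.Int.toStr number).toList with
  | nil => simp [pvScanB]
  | cons c0 rest =>
    simp only []
    rw [pvA1 rest 1 c0 []]
    rw [(pvLQ (c0 :: rest)).1 c0 rest none rfl (by simp)]
    simp
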